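-- pv_equiv track=rewrite | github.com/cprnn/python | dicionario.py | getUnderAge
-- ===== SOURCE A (Python) =====
-- age = 18
--
-- def getUnderAge(dict):
--     dictMin = {}
--     for cont, value in dict.items():
--         if(value["idade"] < age):
--             dictMin[cont] = value
--
--     for cont in dictMin:
--         dict.pop(cont)
--
--     return dictMin
-- ===== SOURCE B (Python) =====
-- age = 18
--
-- def getUnderAge(dict):
--     # Recursive partition of the items into (under, over) pairs, built back-to-front;
--     # then rebuild both sides as dicts. KeyError during split leaves dict untouched, like A.
--     def split(items):
--         if not items:
--             return [], []
--         (k, v), rest = items[0], items[1:]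
--         under, over = split(rest)
--         if v["idade"] < age:
--             return [(k, v)] + under, over
--         return under, [(k, v)] + over
--     under, over = split(list(dict.items()))
--     dict.clear()
--     dict.update(over)
--     return {k: v for k, v in under}
-- ===== Notes on version B (the rewrite author's own statement) =====
-- stated objective: alternative
-- what changed: B partitions the items by structural recursion into (under, over) pair lists built back-to-front and rebuilds both dicts from those lists, instead of A's iterative dict-building loop followed by a pop loop over the selected keys.
import Mathlib
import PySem

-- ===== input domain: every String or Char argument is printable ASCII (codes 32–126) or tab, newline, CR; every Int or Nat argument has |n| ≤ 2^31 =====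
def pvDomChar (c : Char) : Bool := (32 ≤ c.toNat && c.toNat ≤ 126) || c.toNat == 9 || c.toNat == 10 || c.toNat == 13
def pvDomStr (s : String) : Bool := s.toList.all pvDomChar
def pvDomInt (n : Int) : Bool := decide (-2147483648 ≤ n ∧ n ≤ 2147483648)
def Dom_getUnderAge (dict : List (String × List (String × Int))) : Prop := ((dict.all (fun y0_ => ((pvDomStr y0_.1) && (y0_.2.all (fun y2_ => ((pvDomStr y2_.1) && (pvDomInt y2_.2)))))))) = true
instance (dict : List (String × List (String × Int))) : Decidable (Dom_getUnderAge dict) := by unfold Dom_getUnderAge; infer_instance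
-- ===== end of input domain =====

-- B recursively partitions the items into (under, over) lists and rebuilds both dicts from them,
-- instead of A's iterative dict-building loop plus pop loop (objective: alternative). Equivalence
-- is about the RETURN value only; both programs mutate the argument to the same final dict.

-- ===== PORT A =====
-- A: build dictMin by inserting each under-age entry into a fresh dict, return its items.
-- (A's second loop pops those keys from the argument; that mutation does not affect the return value.)
def getUnderAge (dict : List (String × List (String × Int))) : List (String × List (String × Int)) :=
  (dict.foldl
    (fun dictMin kv =>
      if (PySem.Dict.mk kv.2).getD "idade" 0 < 18 then dictMin.insert kv.1 kv.2 else dictMin)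
    PySem.Dict.empty).items

-- ===== PORT B =====
-- B's split: structural recursion returning the (under, over) partition, built back-to-front.
def splitUnder : List (String × List (String × Int)) →
    List (String × List (String × Int)) × List (String × List (String × Int))
  | [] => ([], [])
  | kv :: rest =>
    let uo := splitUnder rest
    if (PySem.Dict.mk kv.2).getD "idade" 0 < 18 then (kv :: uo.1, uo.2) else (uo.1, kv :: uo.2)

-- B: split, then rebuild the returned dict from the under pairs ({k: v for k, v in under}).
-- (over/clear/update only mutate the argument, which is not modeled.)
def getUnderAge_alt (dict : List (String × List (String × Int))) : List (String × List (String × Int)) :=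
  ((splitUnder dict).1.foldl (fun d kv => d.insert kv.1 kv.2) PySem.Dict.empty).items

-- ===== PRECONDITION & SPEC =====
-- Pre_ excludes (a) association lists with duplicate outer keys, which do not arise from a Python
-- dict argument (the dict collapses duplicates), and (b) entries whose value lacks an "idade" key,
-- on which A raises KeyError.
def Pre_getUnderAge (dict : List (String × List (String × Int))) : Prop :=
  (dict.map Prod.fst).Nodup ∧ ∀ kv ∈ dict, (PySem.Dict.mk kv.2).contains "idade" = true
instance (dict : List (String × List (String × Int))) : Decidable (Pre_getUnderAge dict) := by
  unfold Pre_getUnderAge; infer_instance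

def pvWitness_getUnderAge : (List (String × List (String × Int))) :=
  [("ana", [("idade", 15)]), ("bob", [("idade", 30)])]

def Spec_getUnderAge (dict : List (String × List (String × Int))) (out : List (String × List (String × Int))) : Prop := out = getUnderAge_alt dict
instance (dict : List (String × List (String × Int))) (out : List (String × List (String × Int))) : Decidable (Spec_getUnderAge dict out) := by unfold Spec_getUnderAge; infer_instance

-- ===== CLAIM =====
def Claim_equal_getUnderAge : Prop := ∀ (dict : List (String × List (String × Int))), Dom_getUnderAge dict → Pre_getUnderAge dict → Spec_getUnderAge dict (getUnderAge dict)

-- ===== LEMMAS AND PROOFS =====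
-- A's loop invariant: inserting along a list of fresh, pairwise-distinct keys appends the kept entries.
lemma foldl_insert_if_items
    (l : List (String × List (String × Int))) (d : PySem.Dict String (List (String × Int)))
    (hfresh : ∀ kv ∈ l, d.contains kv.1 = false) (hnd : (l.map Prod.fst).Nodup) :
    (l.foldl
      (fun dictMin kv =>
        if (PySem.Dict.mk kv.2).getD "idade" 0 < 18 then dictMin.insert kv.1 kv.2 else dictMin)
      d).items
    = d.items ++ l.filter (fun kv => decide ((PySem.Dict.mk kv.2).getD "idade" 0 < 18)) := by
  induction l generalizing d with
  | nil => simp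
  | cons kv tl ih =>
    simp only [List.map_cons, List.nodup_cons, List.mem_map] at hnd
    obtain ⟨hhead, htl⟩ := hnd
    by_cases hp : (PySem.Dict.mk kv.2).getD "idade" 0 < 18
    · have hc : d.contains kv.1 = false := hfresh kv (List.mem_cons_self ..)
      have hfresh' : ∀ p ∈ tl, (d.insert kv.1 kv.2).contains p.1 = false := by
        intro p hp'
        rw [PySem.Dict.contains_insert]
        have h1 : (p.1 == kv.1) = false := by
          simp only [beq_eq_false_iff_ne, ne_eq]
          intro h; exact hhead ⟨p, hp', h⟩
        rw [h1, hfresh p (List.mem_cons_of_mem _ hp')]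
        rfl
      have hitems := PySem.Dict.items_insert_of_not_contains (d := d) (k := kv.1) (v := kv.2) hc
      simp [List.foldl_cons, if_pos hp, decide_eq_true hp,
        ih _ hfresh' htl, hitems]
    · have hfresh' : ∀ p ∈ tl, d.contains p.1 = false := fun p hp' =>
        hfresh p (List.mem_cons_of_mem _ hp')
      simp [List.foldl_cons, if_neg hp, decide_eq_false hp,
        ih _ hfresh' htl]

-- B's recursion computes exactly the under-age filter.
lemma splitUnder_fst (l : List (String × List (String × Int))) :
    (splitUnder l).1 = l.filter (fun kv => decide ((PySem.Dict.mk kv.2).getD "idade" 0 < 18)) := by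
  induction l with
  | nil => rfl
  | cons kv tl ih =>
    by_cases hp : (PySem.Dict.mk kv.2).getD "idade" 0 < 18 <;>
      simp [splitUnder, hp, ih]

-- B's rebuild loop over fresh, pairwise-distinct keys appends all pairs unchanged.
lemma foldl_insert_items
    (l : List (String × List (String × Int))) (d : PySem.Dict String (List (String × Int)))
    (hfresh : ∀ kv ∈ l, d.contains kv.1 = false) (hnd : (l.map Prod.fst).Nodup) :
    (l.foldl (fun d kv => d.insert kv.1 kv.2) d).items = d.items ++ l := by
  induction l generalizing d with
  | nil => simp
  | cons kv tl ih =>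
    simp only [List.map_cons, List.nodup_cons, List.mem_map] at hnd
    obtain ⟨hhead, htl⟩ := hnd
    have hc : d.contains kv.1 = false := hfresh kv (List.mem_cons_self ..)
    have hfresh' : ∀ p ∈ tl, (d.insert kv.1 kv.2).contains p.1 = false := by
      intro p hp'
      rw [PySem.Dict.contains_insert]
      have h1 : (p.1 == kv.1) = false := by
        simp only [beq_eq_false_iff_ne, ne_eq]
        intro h; exact hhead ⟨p, hp', h⟩
      rw [h1, hfresh p (List.mem_cons_of_mem _ hp')]
      rfl
    simp [List.foldl_cons, ih _ hfresh' htl,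
      PySem.Dict.items_insert_of_not_contains (d := d) (k := kv.1) (v := kv.2) hc]

-- ===== VERDICT =====
theorem getUnderAge_spec : Claim_equal_getUnderAge := by
  intro dict _ hpre
  unfold Spec_getUnderAge getUnderAge getUnderAge_alt
  rw [splitUnder_fst,
    foldl_insert_if_items dict PySem.Dict.empty
      (fun kv _ => PySem.Dict.contains_empty ..) hpre.1]
  rw [foldl_insert_items _ PySem.Dict.empty
      (fun kv _ => PySem.Dict.contains_empty ..)
      (hpre.1.sublist (List.filter_sublist.map _))]
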